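-- pv_equiv track=rewrite | github.com/artem3333kot/NootedGreen | tools/linux_mmio_mapper/GhidraMMIOExport.py | snippet_for_address
-- ===== SOURCE A (Python) =====
-- def snippet_for_address(decomp_c, addr_hex, lines_around=3):
--     """
--     Return up to lines_around lines before/after any line containing the
--     address constant (as hex) in the decompiled C.
--     """
--     if not decomp_c:
--         return []
--     needle = addr_hex.lower()
--     source_lines = decomp_c.splitlines()
--     out = []
--     for i, line in enumerate(source_lines):
--         if needle in line.lower():
--             lo = max(0, i - lines_around)
--             hi = min(len(source_lines), i + lines_around + 1)
--             out.extend(source_lines[lo:hi])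
--     # deduplicate while preserving order
--     seen = set()
--     unique = []
--     for l in out:
--         if l not in seen:
--             seen.add(l)
--             unique.append(l)
--     return unique
-- ===== SOURCE B (Python) =====
-- def snippet_for_address(decomp_c, addr_hex, lines_around=3):
--     """
--     Index-table version: compute the list of matching line indices once, then
--     make a single ascending pass over the lines, emitting each line whose index
--     lies in the window of some match, deduplicating by membership in the output.
--     """
--     if not decomp_c:
--         return []
--     needle = addr_hex.lower()
--     lines = decomp_c.splitlines()
--     n = len(lines)
--     matches = [i for i, l in enumerate(lines) if needle in l.lower()]
--     result = []
--     for j, line in enumerate(lines):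
--         if line in result:
--             continue
--         if any(max(0, i - lines_around) <= j < min(n, i + lines_around + 1) for i in matches):
--             result.append(line)
--     return result
-- ===== Notes on version B (the rewrite author's own statement) =====
-- stated objective: alternative
-- what changed: B builds the list of matching line indices once (a comprehension), then makes a single ascending pass over the lines, emitting each line whose index lies in the window of some match with an any() test, deduplicating by membership in the output list; A instead extends per-match slices into one long list and deduplicates afterwards with a separate set-based pass. The proof shows A's first-occurrence order equals ascending index order.
-- intended difference: For negative lines_around where some matching line i has i+lines_around+1 < 0, A's slice upper bound wraps around (Python negative indexing) and A returns spurious lines from near the end of the file (e.g. ['c'] on ('a\nb\nc\nd','a',-2)), while B returns [] because a negative-width window contains no lines, which is the intended meaning of a negative context size. — e.g. on snippet_for_address("a\nb\nc\nd", "a", -2): A returns ["c"], B returns []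
import Mathlib
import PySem

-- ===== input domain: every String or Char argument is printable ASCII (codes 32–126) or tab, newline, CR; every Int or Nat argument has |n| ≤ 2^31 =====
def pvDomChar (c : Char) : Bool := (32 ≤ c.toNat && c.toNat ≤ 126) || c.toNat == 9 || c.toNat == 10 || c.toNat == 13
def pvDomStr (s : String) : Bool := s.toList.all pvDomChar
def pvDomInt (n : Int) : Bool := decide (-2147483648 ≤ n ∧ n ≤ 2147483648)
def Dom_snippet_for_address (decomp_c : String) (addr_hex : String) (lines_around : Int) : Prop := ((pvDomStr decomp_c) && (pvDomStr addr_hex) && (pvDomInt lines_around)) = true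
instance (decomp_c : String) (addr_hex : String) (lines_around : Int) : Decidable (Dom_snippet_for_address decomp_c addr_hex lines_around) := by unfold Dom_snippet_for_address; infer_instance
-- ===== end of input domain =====

-- B computes the list of matching line indices once, then makes one ascending pass emitting each line whose
-- index falls in the window of some match, deduplicating by membership in the output list: an alternative
-- decomposition of A's per-match slice extension + separate set-based dedup pass; B drops A's negative-index
-- slice wraparound for negative lines_around (stated in D_ below).


-- ===== PORT A =====
def snippet_for_address (decomp_c : String) (addr_hex : String) (lines_around : Int) : List String :=
  if decomp_c = "" then []
  else
    let needle := PySem.Str.lower addr_hex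
    let source_lines := PySem.Str.splitlines decomp_c
    let out := (PySem.List.enumerate source_lines).foldl
      (fun acc pr =>
        if PySem.Str.isIn needle (PySem.Str.lower pr.2) then
          acc ++ PySem.List.slice source_lines
            (some (max 0 (pr.1 - lines_around)))
            (some (min (source_lines.length : Int) (pr.1 + lines_around + 1)))
        else acc) []
    (out.foldl
      (fun (st : PySem.Set String × List String) l =>
        if !(PySem.Set.contains st.1 l) then (PySem.Set.add st.1 l, st.2 ++ [l]) else st)
      (PySem.Set.empty, [])).2

-- ===== PORT B =====
def snippet_for_address_alt (decomp_c : String) (addr_hex : String) (lines_around : Int) : List String :=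
  if decomp_c = "" then []
  else
    let needle := PySem.Str.lower addr_hex
    let lines := PySem.Str.splitlines decomp_c
    let n : Int := lines.length
    let match_idxs := ((PySem.List.enumerate lines).filter
      (fun pr => PySem.Str.isIn needle (PySem.Str.lower pr.2))).map (·.1)
    (PySem.List.enumerate lines).foldl
      (fun (result : List String) pr =>
        if pr.2 ∈ result then result
        else if match_idxs.any
            (fun i => decide (max 0 (i - lines_around) ≤ pr.1 ∧ pr.1 < min n (i + lines_around + 1))) then
          result ++ [pr.2]
        else result) []

-- ===== PRECONDITION & SPEC =====
-- For negative lines_around where some matching line i has i+lines_around+1 < 0, A's slice upper bound wraps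
-- around (Python negative indexing) and A returns spurious lines from near the end of the file, while B
-- returns []: a negative-width context window contains no lines, which is the intended behaviour.
def D_snippet_for_address (decomp_c : String) (addr_hex : String) (lines_around : Int) : Prop :=
  lines_around < 0 ∧ decomp_c ≠ "" ∧
  ∃ pr ∈ PySem.List.enumerate (PySem.Str.splitlines decomp_c),
    PySem.Str.isIn (PySem.Str.lower addr_hex) (PySem.Str.lower pr.2) = true ∧
    pr.1 + lines_around + 1 < 0 ∧
    min (pr.1 - lines_around) ((PySem.Str.splitlines decomp_c).length : Int)
      < ((PySem.Str.splitlines decomp_c).length : Int) + pr.1 + lines_around + 1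
instance (decomp_c : String) (addr_hex : String) (lines_around : Int) : Decidable (D_snippet_for_address decomp_c addr_hex lines_around) := by unfold D_snippet_for_address; infer_instance

def Spec_snippet_for_address (decomp_c : String) (addr_hex : String) (lines_around : Int) (out : List String) : Prop := ¬ D_snippet_for_address decomp_c addr_hex lines_around → out = snippet_for_address_alt decomp_c addr_hex lines_around
instance (decomp_c : String) (addr_hex : String) (lines_around : Int) (out : List String) : Decidable (Spec_snippet_for_address decomp_c addr_hex lines_around out) := by unfold Spec_snippet_for_address; infer_instance

def pvDiffWitness_snippet_for_address : String × String × Int := ("a\nb\nc\nd", "a", -2)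
def pvDiffWitnessOut_snippet_for_address : (List String) × (List String) := (["c"], [])

-- ===== CLAIM (what is proved, stated in full; the proofs are below) =====
def Claim_unchanged_snippet_for_address : Prop := ∀ (decomp_c : String) (addr_hex : String) (lines_around : Int), Dom_snippet_for_address decomp_c addr_hex lines_around → Spec_snippet_for_address decomp_c addr_hex lines_around (snippet_for_address decomp_c addr_hex lines_around)
def Claim_changed_snippet_for_address : Prop := Dom_snippet_for_address (pvDiffWitness_snippet_for_address.1) (pvDiffWitness_snippet_for_address.2.1) (pvDiffWitness_snippet_for_address.2.2) ∧ D_snippet_for_address (pvDiffWitness_snippet_for_address.1) (pvDiffWitness_snippet_for_address.2.1) (pvDiffWitness_snippet_for_address.2.2) ∧ snippet_for_address (pvDiffWitness_snippet_for_address.1) (pvDiffWitness_snippet_for_address.2.1) (pvDiffWitness_snippet_for_address.2.2) = pvDiffWitnessOut_snippet_for_address.1 ∧ snippet_for_address_alt (pvDiffWitness_snippet_for_address.1) (pvDiffWitness_snippet_for_address.2.1) (pvDiffWitness_snippet_for_address.2.2) = pvDiffWitnessOut_snippet_for_address.2 ∧ pvDiffWitnessOut_snippet_for_address.1 ≠ 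pvDiffWitnessOut_snippet_for_address.2
def Claim_exact_snippet_for_address : Prop := ∀ (decomp_c : String) (addr_hex : String) (lines_around : Int), Dom_snippet_for_address decomp_c addr_hex lines_around → D_snippet_for_address decomp_c addr_hex lines_around → snippet_for_address decomp_c addr_hex lines_around ≠ snippet_for_address_alt decomp_c addr_hex lines_around

-- ===== LEMMAS AND PROOFS =====

/-- Left-to-right first-occurrence dedup with an explicit `seen` list: the common
normal form of A's dedup tail and B's collecting pass. -/
def pydedup {α : Type} [DecidableEq α] (seen : List α) : List α → List α
  | [] => []
  | x :: t => if x ∈ seen then pydedup seen t else x :: pydedup (x :: seen) t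

lemma pydedup_cons {α : Type} [DecidableEq α] (s : List α) (x : α) (t : List α) :
    pydedup s (x :: t) = if x ∈ s then pydedup s t else x :: pydedup (x :: s) t := by
  simp only [pydedup]

lemma pydedup_congr {α : Type} [DecidableEq α] (t : List α) :
    ∀ (s s' : List α), (∀ y, y ∈ s ↔ y ∈ s') → pydedup s t = pydedup s' t := by
  induction t with
  | nil => intro s s' _; rfl
  | cons x t ih =>
    intro s s' h
    by_cases hx : x ∈ s
    · rw [pydedup_cons, pydedup, if_pos hx, if_pos ((h x).mp hx), ih s s' h]
    · rw [pydedup_cons, pydedup, if_neg hx, if_neg (fun hc => hx ((h x).mpr hc)),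
        ih (x :: s) (x :: s') (by intro y; simp [List.mem_cons, h y])]

lemma foldA_dedup (xs : List String) :
    ∀ (seen : PySem.Set String) (acc : List String),
    (xs.foldl (fun (st : PySem.Set String × List String) l =>
        if !(PySem.Set.contains st.1 l) then (PySem.Set.add st.1 l, st.2 ++ [l]) else st)
      (seen, acc)).2 = acc ++ pydedup seen xs := by
  induction xs with
  | nil => intro seen acc; simp [pydedup]
  | cons x t ih =>
    intro seen acc
    by_cases hx : x ∈ seen
    · have hc : PySem.Set.contains seen x = true := (PySem.Set.contains_iff _ _).mpr hx
      simp only [List.foldl_cons, hc, Bool.not_true, Bool.false_eq_true, if_false]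
      rw [ih, pydedup_cons, if_pos hx]
    · have hc : PySem.Set.contains seen x = false :=
        Bool.eq_false_iff.mpr (fun h => hx ((PySem.Set.contains_iff _ _).mp h))
      simp only [List.foldl_cons, hc, Bool.not_false, if_true]
      rw [ih, pydedup_cons, if_neg hx, PySem.Set.add_of_not_mem hx,
        pydedup_congr t (seen ++ [x]) (x :: seen) (by intro y; simp [or_comm]),
        List.append_assoc]
      rfl

/-- B's collecting pass: skip lines already in the output, append the in-window ones;
it is filtering by the window predicate followed by first-occurrence dedup. -/
lemma foldB_collect (q : Int → Bool) (l : List (Int × String)) :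
    ∀ (acc : List String),
    l.foldl (fun (result : List String) pr =>
        if pr.2 ∈ result then result
        else if q pr.1 then result ++ [pr.2] else result) acc
      = acc ++ pydedup acc ((l.filter (fun pr => q pr.1)).map (·.2)) := by
  induction l with
  | nil => intro acc; simp [pydedup]
  | cons pr t ih =>
    intro acc
    by_cases hq : q pr.1 = true
    · have hf : List.filter (fun pr => q pr.1) (pr :: t) = pr :: List.filter (fun pr => q pr.1) t :=
        List.filter_cons_of_pos hq
      by_cases hx : pr.2 ∈ acc
      · simp only [List.foldl_cons, if_pos hx]
        rw [ih, hf, List.map_cons, pydedup_cons, if_pos hx]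
      · simp only [List.foldl_cons, if_neg hx, hq, if_true]
        rw [ih, hf, List.map_cons, pydedup_cons, if_neg hx,
          pydedup_congr _ (acc ++ [pr.2]) (pr.2 :: acc) (by intro y; simp [or_comm]),
          List.append_assoc]
        rfl
    · have hq' : q pr.1 = false := Bool.eq_false_iff.mpr hq
      have hf : List.filter (fun pr => q pr.1) (pr :: t) = List.filter (fun pr => q pr.1) t :=
        List.filter_cons_of_neg (by simp [hq'])
      have hstep : (if pr.2 ∈ acc then acc else if q pr.1 then acc ++ [pr.2] else acc) = acc := by
        by_cases hx : pr.2 ∈ acc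
        · rw [if_pos hx]
        · rw [if_neg hx, if_neg (fun h => hq h)]
      simp only [List.foldl_cons, hstep]
      rw [ih, hf]

lemma pydedup_append {α : Type} [DecidableEq α] :
    ∀ (xs ys s : List α), pydedup s (xs ++ ys) = pydedup s xs ++ pydedup (s ++ xs) ys := by
  intro xs
  induction xs with
  | nil => intro ys s; simp [pydedup]
  | cons x t ih =>
    intro ys s
    by_cases hx : x ∈ s
    · have hmem : ∀ y, y ∈ s ++ t ↔ y ∈ s ++ x :: t := by
        intro y
        simp only [List.mem_append, List.mem_cons]
        constructor
        · tauto
        · rintro (h | rfl | h) <;> tauto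
      rw [List.cons_append, pydedup_cons, if_pos hx, ih, pydedup_cons, if_pos hx,
        pydedup_congr ys (s ++ t) (s ++ x :: t) hmem]
    · have hmem : ∀ y, y ∈ (x :: s) ++ t ↔ y ∈ s ++ x :: t := by
        intro y
        simp only [List.mem_append, List.mem_cons]
        constructor
        · rintro ((rfl | h) | h) <;> tauto
        · rintro (h | rfl | h) <;> tauto
      rw [List.cons_append, pydedup_cons, if_neg hx, ih, pydedup_cons, if_neg hx,
        pydedup_congr ys ((x :: s) ++ t) (s ++ x :: t) hmem]
      rfl

lemma pydedup_eq_filter_of_nodup {α : Type} [DecidableEq α] :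
    ∀ (ys : List α), ys.Nodup → ∀ (s : List α),
      pydedup s ys = ys.filter (fun y => decide (y ∉ s)) := by
  intro ys
  induction ys with
  | nil => intro _ _; rfl
  | cons x t ih =>
    intro hnd s
    rcases List.nodup_cons.mp hnd with ⟨hxt, hnt⟩
    by_cases hx : x ∈ s
    · have hf : List.filter (fun y => decide (y ∉ s)) (x :: t)
          = List.filter (fun y => decide (y ∉ s)) t := List.filter_cons_of_neg (by simp [hx])
      rw [pydedup_cons, if_pos hx, hf, ih hnt]
    · have hf : List.filter (fun y => decide (y ∉ s)) (x :: t)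
          = x :: List.filter (fun y => decide (y ∉ s)) t := List.filter_cons_of_pos (by simp [hx])
      rw [pydedup_cons, if_neg hx, hf, ih hnt]
      congr 1
      refine List.filter_congr ?_
      intro y hy
      have hyx : y ≠ x := fun h => hxt (h ▸ hy)
      simp [List.mem_cons, hyx]

lemma pydedup_map_collapse {α β : Type} [DecidableEq α] [DecidableEq β] (f : α → β) :
    ∀ (l : List α) (sI : List α) (sB : List β), (∀ a ∈ sI, f a ∈ sB) →
      pydedup sB ((pydedup sI l).map f) = pydedup sB (l.map f) := by
  intro l
  induction l with
  | nil => intro _ _ _; rfl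
  | cons x t ih =>
    intro sI sB h
    by_cases hx : x ∈ sI
    · rw [pydedup_cons, if_pos hx, List.map_cons, pydedup_cons, if_pos (h x hx), ih sI sB h]
    · rw [pydedup_cons, if_neg hx, List.map_cons, List.map_cons]
      by_cases hfx : f x ∈ sB
      · rw [pydedup_cons, if_pos hfx, pydedup, if_pos hfx,
          ih (x :: sI) sB (fun a ha => (List.mem_cons.mp ha).elim (fun h1 => h1 ▸ hfx) (fun h1 => h a h1))]
      · rw [pydedup_cons, if_neg hfx, pydedup_cons, if_neg hfx]
        rw [ih (x :: sI) (f x :: sB) (fun a ha => (List.mem_cons.mp ha).elim (fun h1 => h1 ▸ List.mem_cons_self)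
              (fun h1 => List.mem_cons_of_mem _ (h a h1)))]

/-- `j` lies in the window of some match index in `M`. -/
def inWinb (r n : Int) (M : List Int) (j : Int) : Bool :=
  M.any (fun i => decide (max 0 (i - r) ≤ j ∧ j < min n (i + r + 1)))

/-- Splitting an ascending list filtered by `P ∨ Q` when every `P`-element precedes
every `(Q ∧ ¬P)`-element. -/
lemma filter_or_split (P Q : Int → Bool) :
    ∀ (L : List Int), L.Pairwise (· < ·) →
      (∀ j ∈ L, ∀ k ∈ L, P k = true → Q j = true → P j = false → k < j) →
      L.filter (fun j => P j || Q j) = L.filter P ++ L.filter (fun j => Q j && !P j) := by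
  intro L
  induction L with
  | nil => intro _ _; rfl
  | cons x t ih =>
    intro hpw hcross
    rcases List.pairwise_cons.mp hpw with ⟨hlt, hpt⟩
    have hcross' : ∀ j ∈ t, ∀ k ∈ t, P k = true → Q j = true → P j = false → k < j :=
      fun j hj k hk => hcross j (List.mem_cons_of_mem _ hj) k (List.mem_cons_of_mem _ hk)
    rcases Bool.eq_false_or_eq_true (P x) with hP | hP
    · rw [List.filter_cons_of_pos (by simp [hP]), List.filter_cons_of_pos (by simp [hP]),
        List.filter_cons_of_neg (by simp [hP]), ih hpt hcross']
      rfl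
    · rcases Bool.eq_false_or_eq_true (Q x) with hQ | hQ
      · have hPt : ∀ k ∈ t, P k = false := by
          intro k hk
          rcases Bool.eq_false_or_eq_true (P k) with h | h
          · exact absurd (hcross x List.mem_cons_self k (List.mem_cons_of_mem _ hk) h hQ hP)
              (by have := hlt k hk; omega)
          · exact h
        have h1 : List.filter P (x :: t) = [] := by
          rw [List.filter_cons_of_neg (by simp [hP])]
          exact List.filter_eq_nil_iff.mpr (fun k hk => by simp [hPt k hk])
        rw [List.filter_cons_of_pos (by simp [hP, hQ]), h1,
          List.filter_cons_of_pos (by simp [hP, hQ]), List.nil_append]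
        congr 1
        rw [ih hpt hcross', List.filter_eq_nil_iff.mpr (fun k hk => by simp [hPt k hk]),
          List.nil_append]
      · rw [List.filter_cons_of_neg (by simp [hP, hQ]), List.filter_cons_of_neg (by simp [hP]),
          List.filter_cons_of_neg (by simp [hP, hQ]), ih hpt hcross']

lemma pyRange_filter_interval (n lo hi : Int) (h0 : 0 ≤ lo) (h1 : lo ≤ hi) (h2 : hi ≤ n) :
    (PySem.List.pyRange 0 n 1).filter (fun j => decide (lo ≤ j ∧ j < hi))
      = PySem.List.pyRange lo hi 1 := by
  rw [PySem.List.pyRange_one_append 0 lo n h0 (le_trans h1 h2),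
    PySem.List.pyRange_one_append lo hi n h1 h2, List.filter_append, List.filter_append,
    List.filter_eq_nil_iff.mpr (fun j hj => by
      have h2 := PySem.List.mem_pyRange_one.mp hj; simp only [decide_eq_true_eq]; omega),
    List.filter_eq_self.mpr (fun j hj => by
      have h2 := PySem.List.mem_pyRange_one.mp hj; simp only [decide_eq_true_eq]; omega),
    List.filter_eq_nil_iff.mpr (fun j hj => by
      have h2 := PySem.List.mem_pyRange_one.mp hj; simp only [decide_eq_true_eq]; omega),
    List.nil_append, List.append_nil]

lemma slice_eq_map_range (src : List String) (a b : Int) (h0 : 0 ≤ a) (hab : a ≤ b)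
    (hbn : b ≤ (src.length : Int)) :
    PySem.List.slice src (some a) (some b)
      = (PySem.List.pyRange a b 1).map (fun j => PySem.List.pyGetD src j "") := by
  rw [PySem.List.slice_toNat src h0 (le_trans h0 hab), PySem.List.pyRange_one, List.map_map]
  apply List.ext_getElem
  · simp
    omega
  · intro k h1 h2
    simp only [List.getElem_take, List.getElem_drop, Function.comp_apply, List.getElem_map,
      List.getElem_range]
    have hk : ((a.toNat + k : Nat) : Int) = a + (k : Int) := by omega
    rw [← hk, PySem.List.pyGetD_natCast]
    have hlt : a.toNat + k < src.length := by
      simp at h1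
      omega
    rw [List.getD_eq_getElem _ _ hlt]

lemma mem_flatMap_win (r n : Int) (M : List Int) (j : Int) :
    (j ∈ M.flatMap (fun i => PySem.List.pyRange (max 0 (i - r)) (min n (i + r + 1)) 1))
      ↔ inWinb r n M j = true := by
  rw [List.mem_flatMap, inWinb, List.any_eq_true]
  constructor
  · rintro ⟨i, hi, hj⟩
    exact ⟨i, hi, by simpa using PySem.List.mem_pyRange_one.mp hj⟩
  · rintro ⟨i, hi, hj⟩
    exact ⟨i, hi, PySem.List.mem_pyRange_one.mpr (by simpa using hj)⟩

lemma L2 (n r : Int) (hr : 0 ≤ r) :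
    ∀ (M : List Int), M.Pairwise (· < ·) → (∀ i ∈ M, 0 ≤ i ∧ i < n) →
      pydedup [] (M.flatMap (fun i => PySem.List.pyRange (max 0 (i - r)) (min n (i + r + 1)) 1))
        = (PySem.List.pyRange 0 n 1).filter (inWinb r n M) := by
  intro M
  induction M using List.reverseRecOn with
  | nil =>
    intro _ _
    simp [pydedup, inWinb, List.filter_eq_nil_iff]
  | append_singleton M m ih =>
    intro hpw hbd
    have hpw' : M.Pairwise (· < ·) := (List.pairwise_append.mp hpw).1
    have hbd' : ∀ i ∈ M, 0 ≤ i ∧ i < n := fun i hi => hbd i (List.mem_append_left _ hi)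
    have hmlt : ∀ i ∈ M, i < m := fun i hi =>
      (List.pairwise_append.mp hpw).2.2 i hi m List.mem_cons_self
    rcases hbd m (List.mem_append_right _ List.mem_cons_self) with ⟨hm0, hmn⟩
    have hlo0 : (0 : Int) ≤ max 0 (m - r) := le_max_left _ _
    have hlohi : max 0 (m - r) ≤ min n (m + r + 1) := by omega
    have hhin : min n (m + r + 1) ≤ n := min_le_left _ _
    rw [List.flatMap_append, pydedup_append, List.nil_append, ih hpw' hbd',
      List.flatMap_cons, List.flatMap_nil, List.append_nil,
      pydedup_eq_filter_of_nodup _ (PySem.List.nodup_pyRange_one _ _),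
      ← pyRange_filter_interval n (max 0 (m - r)) (min n (m + r + 1)) hlo0 hlohi hhin,
      List.filter_filter]
    have hQP : ∀ j : Int,
        (decide (j ∉ M.flatMap (fun i => PySem.List.pyRange (max 0 (i - r)) (min n (i + r + 1)) 1))
          && decide (max 0 (m - r) ≤ j ∧ j < min n (m + r + 1)))
        = (decide (max 0 (m - r) ≤ j ∧ j < min n (m + r + 1)) && !(inWinb r n M j)) := by
      intro j
      rw [Bool.and_comm]
      congr 1
      rcases Bool.eq_false_or_eq_true (inWinb r n M j) with h | h
      · simp [h, (mem_flatMap_win r n M j).mpr h]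
      · simp [h, (mem_flatMap_win r n M j).not.mpr (by simp [h])]
    rw [List.filter_congr (fun j _ => hQP j)]
    have hsplit := filter_or_split (inWinb r n M)
      (fun j => decide (max 0 (m - r) ≤ j ∧ j < min n (m + r + 1)))
      (PySem.List.pyRange 0 n 1) (PySem.List.pairwise_lt_pyRange_one 0 n)
      (by
        intro j hj k hk hPk hQj hPj
        rcases List.any_eq_true.mp hPk with ⟨i, hiM, hik⟩
        have hik' : max 0 (i - r) ≤ k ∧ k < min n (i + r + 1) := by simpa using hik
        have hQj' : max 0 (m - r) ≤ j ∧ j < min n (m + r + 1) := by simpa using hQj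
        have hilt : i < m := hmlt i hiM
        by_contra hc
        have hji : max 0 (i - r) ≤ j ∧ j < min n (i + r + 1) := by omega
        have : inWinb r n M j = true := List.any_eq_true.mpr ⟨i, hiM, by simpa using hji⟩
        rw [this] at hPj
        exact Bool.true_eq_false.mp hPj)
    rw [← hsplit]
    refine List.filter_congr (fun j _ => ?_)
    simp only [inWinb, List.any_append, List.any_cons, List.any_nil, Bool.or_false]

lemma A_char (d a : String) (r : Int) (hd : ¬ d = "") :
    snippet_for_address d a r = pydedup []
      (((PySem.List.enumerate (PySem.Str.splitlines d)).filter
          (fun pr => PySem.Str.isIn (PySem.Str.lower a) (PySem.Str.lower pr.2))).flatMap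
        (fun pr => PySem.List.slice (PySem.Str.splitlines d)
          (some (max 0 (pr.1 - r)))
          (some (min (((PySem.Str.splitlines d).length : Nat) : Int) (pr.1 + r + 1))))) := by
  unfold snippet_for_address
  rw [if_neg hd]
  show ((((PySem.List.enumerate (PySem.Str.splitlines d)).foldl
      (fun acc pr =>
        if PySem.Str.isIn (PySem.Str.lower a) (PySem.Str.lower pr.2) then
          acc ++ PySem.List.slice (PySem.Str.splitlines d)
            (some (max 0 (pr.1 - r)))
            (some (min (((PySem.Str.splitlines d).length : Nat) : Int) (pr.1 + r + 1)))
        else acc) []).foldl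
      (fun (st : PySem.Set String × List String) l =>
        if !(PySem.Set.contains st.1 l) then (PySem.Set.add st.1 l, st.2 ++ [l]) else st)
      (PySem.Set.empty, [])).2) = _
  rw [foldA_dedup, PySem.List.foldl_if_eq_foldl_filter, PySem.List.foldl_append_eq_flatMap,
    List.nil_append, List.nil_append]
  rfl

lemma B_char (d a : String) (r : Int) (hd : ¬ d = "") :
    snippet_for_address_alt d a r = pydedup []
      (((PySem.List.enumerate (PySem.Str.splitlines d)).filter
          (fun pr => inWinb r (((PySem.Str.splitlines d).length : Nat) : Int)
            (((PySem.List.enumerate (PySem.Str.splitlines d)).filter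
              (fun pr => PySem.Str.isIn (PySem.Str.lower a) (PySem.Str.lower pr.2))).map (·.1))
            pr.1)).map (·.2)) := by
  unfold snippet_for_address_alt
  rw [if_neg hd]
  show ((PySem.List.enumerate (PySem.Str.splitlines d)).foldl
      (fun (result : List String) pr =>
        if pr.2 ∈ result then result
        else if inWinb r (((PySem.Str.splitlines d).length : Nat) : Int)
            (((PySem.List.enumerate (PySem.Str.splitlines d)).filter
              (fun pr => PySem.Str.isIn (PySem.Str.lower a) (PySem.Str.lower pr.2))).map (·.1))
            pr.1 then
          result ++ [pr.2]
        else result) []) = _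
  rw [foldB_collect (fun j => inWinb r (((PySem.Str.splitlines d).length : Nat) : Int)
      (((PySem.List.enumerate (PySem.Str.splitlines d)).filter
        (fun pr => PySem.Str.isIn (PySem.Str.lower a) (PySem.Str.lower pr.2))).map (·.1)) j),
    List.nil_append]

lemma inWinb_neg (r n : Int) (hr : r < 0) (M : List Int) (j : Int) :
    inWinb r n M j = false := by
  rw [inWinb]
  simp only [List.any_eq_false, decide_eq_true_eq]
  intro i _
  omega

/-- For a negative window size B returns `[]`. -/
lemma Balt_neg (d a : String) (r : Int) (hr : r < 0) :
    snippet_for_address_alt d a r = [] := by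
  by_cases hd : d = ""
  · unfold snippet_for_address_alt
    rw [if_pos hd]
  · rw [B_char d a r hd,
      List.filter_congr (fun pr _ => inWinb_neg _ _ hr _ pr.1),
      List.filter_false, List.map_nil]
    rfl

theorem AB_eq (d a : String) (r : Int) (hD : ¬ D_snippet_for_address d a r) :
    snippet_for_address d a r = snippet_for_address_alt d a r := by
  by_cases hd : d = ""
  · unfold snippet_for_address snippet_for_address_alt
    rw [if_pos hd, if_pos hd]
  · by_cases hr : 0 ≤ r
    · -- r ≥ 0 : full equivalence through the ascending-union normal form
      rw [A_char d a r hd, B_char d a r hd]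
      have hpbM : (((PySem.List.enumerate (PySem.Str.splitlines d)).filter
          (fun pr => PySem.Str.isIn (PySem.Str.lower a) (PySem.Str.lower pr.2))).map
            (·.1)).Pairwise (· < ·) := by
        rw [List.pairwise_map]
        exact (PySem.List.pairwise_lt_enumerate _ _).filter _
      have hbdM : ∀ i ∈ ((PySem.List.enumerate (PySem.Str.splitlines d)).filter
          (fun pr => PySem.Str.isIn (PySem.Str.lower a) (PySem.Str.lower pr.2))).map (·.1),
          0 ≤ i ∧ i < ((PySem.Str.splitlines d).length : Int) := by
        intro i hi
        rcases List.mem_map.mp hi with ⟨pr, hprf, rfl⟩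
        rcases (PySem.List.mem_enumerate_iff _ _ _).mp (List.mem_filter.mp hprf).1
          with ⟨k, hk, rfl⟩
        simp
        omega
      -- A side: slices are windows mapped through the line lookup
      have hslice : ∀ pr ∈ (PySem.List.enumerate (PySem.Str.splitlines d)).filter
          (fun pr => PySem.Str.isIn (PySem.Str.lower a) (PySem.Str.lower pr.2)),
          PySem.List.slice (PySem.Str.splitlines d)
            (some (max 0 (pr.1 - r)))
            (some (min (((PySem.Str.splitlines d).length : Nat) : Int) (pr.1 + r + 1)))
          = (fun pr : Int × String =>
              ((fun i => PySem.List.pyRange (max 0 (i - r))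
                (min (((PySem.Str.splitlines d).length : Nat) : Int) (i + r + 1)) 1) pr.1).map
                (fun j => PySem.List.pyGetD (PySem.Str.splitlines d) j "")) pr := by
        intro pr hpr
        rcases (PySem.List.mem_enumerate_iff _ _ _).mp (List.mem_filter.mp hpr).1
          with ⟨k, hk, rfl⟩
        exact slice_eq_map_range (PySem.Str.splitlines d)
          (max 0 ((0 : Int) + (k : Int) - r))
          (min (((PySem.Str.splitlines d).length : Nat) : Int) ((0 : Int) + (k : Int) + r + 1))
          (le_max_left _ _) (by have := hk; omega) (by have := hk; omega)
      rw [List.flatMap_congr hslice, ← List.map_flatMap]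
      have hMB : ((PySem.List.enumerate (PySem.Str.splitlines d)).filter
            (fun pr => PySem.Str.isIn (PySem.Str.lower a) (PySem.Str.lower pr.2))).flatMap
              (fun pr => (fun i => PySem.List.pyRange (max 0 (i - r))
                (min (((PySem.Str.splitlines d).length : Nat) : Int) (i + r + 1)) 1) pr.1)
          = (((PySem.List.enumerate (PySem.Str.splitlines d)).filter
            (fun pr => PySem.Str.isIn (PySem.Str.lower a) (PySem.Str.lower pr.2))).map
              (fun x => x.1)).flatMap
              (fun i => PySem.List.pyRange (max 0 (i - r))
                (min (((PySem.Str.splitlines d).length : Nat) : Int) (i + r + 1)) 1) :=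
        (List.flatMap_map (fun x : Int × String => x.1)
          (fun i => PySem.List.pyRange (max 0 (i - r))
            (min (((PySem.Str.splitlines d).length : Nat) : Int) (i + r + 1)) 1)
          ((PySem.List.enumerate (PySem.Str.splitlines d)).filter
            (fun pr => PySem.Str.isIn (PySem.Str.lower a) (PySem.Str.lower pr.2)))).symm
      rw [hMB, ← pydedup_map_collapse (fun j => PySem.List.pyGetD (PySem.Str.splitlines d) j "")
          _ [] [] (by simp),
        L2 _ r hr _ hpbM hbdM]
      -- B side: unfold the enumerate pass into the index range
      rw [PySem.List.enumerate_eq_map_pyRange (PySem.Str.splitlines d) ""]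
      simp only [List.filter_map, List.map_map]
      rfl
    · have hr' : r < 0 := by omega
      -- r < 0 : both sides collapse to []
      rw [Balt_neg d a r hr', A_char d a r hd]
      have hempty : ∀ pr ∈ (PySem.List.enumerate (PySem.Str.splitlines d)).filter
          (fun pr => PySem.Str.isIn (PySem.Str.lower a) (PySem.Str.lower pr.2)),
          PySem.List.slice (PySem.Str.splitlines d)
            (some (max 0 (pr.1 - r)))
            (some (min (((PySem.Str.splitlines d).length : Nat) : Int) (pr.1 + r + 1)))
          = (fun _ : Int × String => ([] : List String)) pr := by
        intro pr hpr
        have hprE := (List.mem_filter.mp hpr).1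
        have hpb := (List.mem_filter.mp hpr).2
        rcases (PySem.List.mem_enumerate_iff _ _ _).mp hprE with ⟨k, hk, rfl⟩
        by_cases hneg : ((0 : Int) + (k : Int), (PySem.Str.splitlines d)[k]).1 + r + 1 < 0
        · -- wrapped upper bound: excluded by ¬D_
          have hwrap : ¬ (min (((0 : Int) + (k : Int)) - r)
              ((PySem.Str.splitlines d).length : Int)
              < ((PySem.Str.splitlines d).length : Int) + ((0 : Int) + (k : Int)) + r + 1) := by
            intro hlt
            exact hD ⟨hr', hd, ⟨((0 : Int) + (k : Int), (PySem.Str.splitlines d)[k]),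
              hprE, hpb, hneg, hlt⟩⟩
          apply List.eq_nil_of_length_eq_zero
          rw [PySem.List.length_slice]
          have hm : min (((PySem.Str.splitlines d).length : Nat) : Int)
              (((0 : Int) + (k : Int), (PySem.Str.splitlines d)[k]).1 + r + 1)
              = -(((-((0 : Int) + (k : Int) + r + 1)).toNat : Nat) : Int) := by
            simp only at hneg ⊢
            omega
          have hlo : max 0 ((((0 : Int) + (k : Int), (PySem.Str.splitlines d)[k]).1) - r)
              = (((max 0 ((0 : Int) + (k : Int) - r)).toNat : Nat) : Int) := by
            simp only
            omega
          rw [hm, hlo, PySem.List.clampIdx_neg_natCast _ _ (by simp only at hneg; omega),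
            PySem.List.clampIdx_natCast]
          simp only at hneg hwrap
          omega
        · -- ordinary empty slice: hi ≤ i < lo
          rw [PySem.List.slice_toNat _ (le_max_left _ _) (by simp only at hneg ⊢; omega)]
          have h0 : (min (((PySem.Str.splitlines d).length : Nat) : Int)
                (((0 : Int) + (k : Int), (PySem.Str.splitlines d)[k]).1 + r + 1)).toNat
              - (max 0 ((((0 : Int) + (k : Int), (PySem.Str.splitlines d)[k]).1) - r)).toNat
              = 0 := by
            simp only
            omega
          rw [h0, List.take_zero]
      rw [List.flatMap_congr hempty]
      have : ((PySem.List.enumerate (PySem.Str.splitlines d)).filter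
          (fun pr => PySem.Str.isIn (PySem.Str.lower a) (PySem.Str.lower pr.2))).flatMap
            (fun _ : Int × String => ([] : List String)) = [] := by
        simp
      rw [this]
      rfl

theorem AB_ne (d a : String) (r : Int) (hDD : D_snippet_for_address d a r) :
    snippet_for_address d a r ≠ snippet_for_address_alt d a r := by
  obtain ⟨hr, hd, pr, hprE, hpb, hneg, hwrap⟩ := hDD
  rw [Balt_neg d a r hr, A_char d a r hd]
  intro hnil
  rcases (PySem.List.mem_enumerate_iff _ _ _).mp hprE with ⟨k, hk, rfl⟩
  simp only at hneg hwrap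
  -- the wrapped slice at the witness match is nonempty
  have hlen : 0 < (PySem.List.slice (PySem.Str.splitlines d)
      (some (max 0 ((0 : Int) + (k : Int) - r)))
      (some (min (((PySem.Str.splitlines d).length : Nat) : Int)
        ((0 : Int) + (k : Int) + r + 1)))).length := by
    rw [PySem.List.length_slice]
    have hm : min (((PySem.Str.splitlines d).length : Nat) : Int)
        ((0 : Int) + (k : Int) + r + 1)
        = -(((-((0 : Int) + (k : Int) + r + 1)).toNat : Nat) : Int) := by omega
    have hlo : max 0 ((0 : Int) + (k : Int) - r)
        = (((max 0 ((0 : Int) + (k : Int) - r)).toNat : Nat) : Int) := by omega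
    rw [hm, hlo, PySem.List.clampIdx_neg_natCast _ _ (by omega), PySem.List.clampIdx_natCast]
    omega
  rcases List.exists_mem_of_length_pos hlen with ⟨x, hx⟩
  have hmem : x ∈ ((PySem.List.enumerate (PySem.Str.splitlines d)).filter
      (fun pr => PySem.Str.isIn (PySem.Str.lower a) (PySem.Str.lower pr.2))).flatMap
        (fun pr => PySem.List.slice (PySem.Str.splitlines d)
          (some (max 0 (pr.1 - r)))
          (some (min (((PySem.Str.splitlines d).length : Nat) : Int) (pr.1 + r + 1)))) :=
    List.mem_flatMap.mpr ⟨((0 : Int) + (k : Int), (PySem.Str.splitlines d)[k]),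
      List.mem_filter.mpr ⟨hprE, hpb⟩, hx⟩
  rcases List.exists_cons_of_ne_nil (List.ne_nil_of_mem hmem) with ⟨y, t, heq⟩
  rw [heq, pydedup_cons, if_neg (List.not_mem_nil)] at hnil
  exact List.cons_ne_nil _ _ hnil

-- ===== VERDICT (by name: the statement is the Claim_ definition above) =====
theorem snippet_for_address_spec : Claim_unchanged_snippet_for_address := by
  intro decomp_c addr_hex lines_around _ hD
  exact AB_eq decomp_c addr_hex lines_around hD
theorem snippet_for_address_changed : Claim_changed_snippet_for_address := by
  unfold Claim_changed_snippet_for_address; decide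
theorem snippet_for_address_tight : Claim_exact_snippet_for_address := by
  intro decomp_c addr_hex lines_around _ hDD
  exact AB_ne decomp_c addr_hex lines_around hDD
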